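-- pv_equiv track=rewrite | github.com/JeremyMet/DES | src/DES.py | convert_byte_to_block
-- ===== SOURCE A (Python) =====
-- def convert_byte_to_block(byte):
--     ret = 0 ;
--     cpt = 0 ;
--     for b in byte:
--         ret = ret << 8 ^ b ;
--         cpt+=1 ;
--     pad_len = 8-cpt ;
--     for _ in range(pad_len):
--         ret = ret << 8 ^ pad_len ;
--     return ret ;
-- ===== SOURCE B (Python) =====
-- def convert_byte_to_block(byte):
--     pad_len = 8 - len(byte)
--     full = list(byte) + [pad_len] * pad_len
--     ret = 0
--     shift = 8 * (len(full) - 1)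
--     for b in full:
--         ret ^= b << shift
--         shift -= 8
--     return ret
-- ===== Notes on version B (the rewrite author's own statement) =====
-- stated objective: alternative
-- what changed: A accumulates the block with a stateful shift-and-XOR loop plus a counter and a second padding loop; B first builds the padded buffer (data plus pad_len entries of value pad_len) and then XORs each entry shifted into its closed-form bit position 8*(len-1-i) in one pass.
import Mathlib
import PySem

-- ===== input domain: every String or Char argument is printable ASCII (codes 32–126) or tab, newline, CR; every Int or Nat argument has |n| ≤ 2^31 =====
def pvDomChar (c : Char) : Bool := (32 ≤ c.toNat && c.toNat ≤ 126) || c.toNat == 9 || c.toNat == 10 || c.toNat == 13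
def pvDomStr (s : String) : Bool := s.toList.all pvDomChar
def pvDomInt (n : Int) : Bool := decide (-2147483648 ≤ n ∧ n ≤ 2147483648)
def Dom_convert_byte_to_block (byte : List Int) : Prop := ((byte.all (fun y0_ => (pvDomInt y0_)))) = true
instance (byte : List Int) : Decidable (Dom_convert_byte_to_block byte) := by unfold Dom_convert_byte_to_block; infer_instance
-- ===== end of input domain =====

-- B replaces A's stateful shift-and-XOR accumulation loops (data loop with counter, then a
-- padding loop) by building the padded buffer first and XOR-ing each entry shifted into its
-- closed-form bit position 8*(len-1-i) (alternative decomposition).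

-- ===== PORT A =====
-- literal transliteration: first loop folds (ret, cpt); second loop runs over range(pad_len)
def convert_byte_to_block (byte : List Int) : Int :=
  let s := byte.foldl (fun (s : Int × Int) b => (PySem.Int.bxor (s.1 <<< (8:Nat)) b, s.2 + 1)) (0, 0)
  let pad_len := 8 - s.2
  (PySem.List.pyRange 0 pad_len 1).foldl (fun r _ => PySem.Int.bxor (r <<< (8:Nat)) pad_len) s.1

-- ===== PORT B =====
-- builds the padded buffer, then XORs each entry shifted into its bit position;
-- shift is a Python int, always ≥ 0 when used, so 'b << shift' is 'b <<< shift.toNat' exactly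
def convert_byte_to_block_alt (byte : List Int) : Int :=
  let pad_len : Int := 8 - byte.length
  let full := byte ++ List.replicate pad_len.toNat pad_len
  (full.foldl (fun (s : Int × Int) (b : Int) => (PySem.Int.bxor s.1 (b <<< s.2.toNat), s.2 - 8))
      (0, 8 * ((full.length : Int) - 1))).1

-- ===== PRECONDITION & SPEC =====
def Spec_convert_byte_to_block (byte : List Int) (out : Int) : Prop := out = convert_byte_to_block_alt byte
instance (byte : List Int) (out : Int) : Decidable (Spec_convert_byte_to_block byte out) := by unfold Spec_convert_byte_to_block; infer_instance

-- ===== CLAIM (what is proved, stated in full; the proofs are below) =====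
def Claim_equal_convert_byte_to_block : Prop := ∀ (byte : List Int), Dom_convert_byte_to_block byte → Spec_convert_byte_to_block byte (convert_byte_to_block byte)

-- ===== LEMMAS AND PROOFS =====

-- proof-side view of B's loop: XOR of each entry shifted into its bit position
def xorShifted : List Int → Int
  | [] => 0
  | b :: t => PySem.Int.bxor (b <<< (8 * t.length)) (xorShifted t)

-- two's-complement view of an Int: ofB false n = n, ofB true n = -n-1 (sign, magnitude-complement)
def ofB (s : Bool) (n : Nat) : Int := if s then -(n : Int) - 1 else (n : Int)

lemma exists_ofB (a : Int) : ∃ s n, a = ofB s n := by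
  by_cases h : 0 ≤ a
  · exact ⟨false, a.toNat, by simp [ofB, Int.toNat_of_nonneg h]⟩
  · exact ⟨true, (-a - 1).toNat, by simp [ofB]; omega⟩

lemma bxor_ofB (s t : Bool) (m n : Nat) :
    PySem.Int.bxor (ofB s m) (ofB t n) = ofB (s ^^ t) (m ^^^ n) := by
  cases s <;> cases t
  · simp [ofB, PySem.Int.bxor_natCast]
  · simp [ofB, PySem.Int.bxor]
    omega
  · simp [ofB, PySem.Int.bxor]
    omega
  · simp [ofB, PySem.Int.bxor]
    rw [if_neg (show ¬ (1:Int) ≤ -(m:Int) by omega), if_neg (show ¬ (1:Int) ≤ -(n:Int) by omega)]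

-- low bits filled with ones after shifting: m <<< k ||| (2^k - 1) as a sum
lemma orlow (m k : Nat) : m <<< k ||| (2 ^ k - 1) = 2 ^ k * m + (2 ^ k - 1) := by
  apply Nat.eq_of_testBit_eq
  intro i
  rw [Nat.testBit_or, Nat.testBit_shiftLeft,
    Nat.testBit_two_pow_mul_add m (Nat.sub_lt (Nat.two_pow_pos k) Nat.one_pos) i,
    Nat.testBit_two_pow_sub_one]
  by_cases h : i < k
  · simp [h, show ¬ i ≥ k by omega]
  · simp [h, show i ≥ k by omega]

lemma natN1 (x y k : Nat) : (x ^^^ y) <<< k = (x <<< k) ^^^ (y <<< k) := by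
  apply Nat.eq_of_testBit_eq
  intro i
  by_cases h : k ≤ i
  · simp [Nat.testBit_xor, Nat.testBit_shiftLeft, h]
  · simp [Nat.testBit_xor, Nat.testBit_shiftLeft, h]

lemma natN2 (x y k : Nat) :
    (x <<< k) ^^^ (y <<< k ||| (2 ^ k - 1)) = ((x ^^^ y) <<< k) ||| (2 ^ k - 1) := by
  apply Nat.eq_of_testBit_eq
  intro i
  by_cases h : k ≤ i
  · simp [Nat.testBit_xor, Nat.testBit_or, Nat.testBit_shiftLeft,
      Nat.testBit_two_pow_sub_one, h, show ¬ i < k by omega]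
  · simp [Nat.testBit_xor, Nat.testBit_or, Nat.testBit_shiftLeft,
      Nat.testBit_two_pow_sub_one, h, show i < k by omega]

lemma natN2' (x y k : Nat) :
    (x <<< k ||| (2 ^ k - 1)) ^^^ (y <<< k) = ((x ^^^ y) <<< k) ||| (2 ^ k - 1) := by
  rw [Nat.xor_comm, natN2, Nat.xor_comm]

lemma natN3 (x y k : Nat) :
    (x <<< k ||| (2 ^ k - 1)) ^^^ (y <<< k ||| (2 ^ k - 1)) = (x ^^^ y) <<< k := by
  apply Nat.eq_of_testBit_eq
  intro i
  by_cases h : k ≤ i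
  · simp [Nat.testBit_xor, Nat.testBit_or, Nat.testBit_shiftLeft,
      Nat.testBit_two_pow_sub_one, h, show ¬ i < k by omega]
  · simp [Nat.testBit_xor, Nat.testBit_or, Nat.testBit_shiftLeft,
      Nat.testBit_two_pow_sub_one, h, show i < k by omega]

lemma shl_ofB_false (m k : Nat) : (ofB false m) <<< k = ofB false (m <<< k) := by
  simp only [ofB, Bool.false_eq_true, if_false]
  rw [Int.shiftLeft_eq, Nat.shiftLeft_eq]
  push_cast
  ring

lemma shl_ofB_true (m k : Nat) : (ofB true m) <<< k = ofB true (m <<< k ||| (2 ^ k - 1)) := by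
  simp only [ofB, if_true]
  rw [orlow, Int.shiftLeft_eq]
  have h1 : (1 : Nat) ≤ 2 ^ k := Nat.one_le_two_pow
  push_cast [h1]
  ring

lemma shl_bxor (a b : Int) (k : Nat) :
    (PySem.Int.bxor a b) <<< k = PySem.Int.bxor (a <<< k) (b <<< k) := by
  obtain ⟨s, m, rfl⟩ := exists_ofB a
  obtain ⟨t, n, rfl⟩ := exists_ofB b
  cases s <;> cases t <;>
    simp only [bxor_ofB, Bool.xor_false, Bool.xor_true,
      Bool.not_true, Bool.not_false, shl_ofB_false, shl_ofB_true]
  · rw [natN1]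
  · rw [natN2]
  · rw [natN2']
  · rw [natN3]

lemma bxor_assoc (a b c : Int) :
    PySem.Int.bxor (PySem.Int.bxor a b) c = PySem.Int.bxor a (PySem.Int.bxor b c) := by
  obtain ⟨s, m, rfl⟩ := exists_ofB a
  obtain ⟨t, n, rfl⟩ := exists_ofB b
  obtain ⟨u, p, rfl⟩ := exists_ofB c
  rw [bxor_ofB, bxor_ofB, bxor_ofB, bxor_ofB, Bool.xor_assoc, Nat.xor_assoc]

-- A's accumulation loop, characterised: the accumulator floats to the top bits
lemma foldA : ∀ (l : List Int) (a : Int),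
    l.foldl (fun r b => PySem.Int.bxor (r <<< (8:Nat)) b) a
      = PySem.Int.bxor (a <<< (8 * l.length)) (xorShifted l)
  | [], a => by simp [xorShifted, PySem.Int.bxor_zero]
  | b :: t, a => by
    simp only [List.foldl_cons, xorShifted, List.length_cons]
    rw [foldA t, shl_bxor, bxor_assoc]
    have h : 8 * (t.length + 1) = 8 + 8 * t.length := by ring
    rw [h, Int.shiftLeft_add]

lemma foldPair : ∀ (l : List Int) (r c : Int),
    l.foldl (fun (s : Int × Int) b => (PySem.Int.bxor (s.1 <<< (8:Nat)) b, s.2 + 1)) (r, c)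
      = (l.foldl (fun r b => PySem.Int.bxor (r <<< (8:Nat)) b) r, c + l.length)
  | [], r, c => by simp
  | b :: t, r, c => by
    simp only [List.foldl_cons, List.length_cons]
    rw [foldPair t]
    refine Prod.ext rfl ?_
    push_cast
    ring

lemma foldConst {α : Type} : ∀ (l : List α) (r p : Int),
    l.foldl (fun r _ => PySem.Int.bxor (r <<< (8:Nat)) p) r
      = (List.replicate l.length p).foldl (fun r b => PySem.Int.bxor (r <<< (8:Nat)) b) r
  | [], _, _ => rfl
  | _ :: t, r, p => by
    simp only [List.foldl_cons, List.length_cons, List.replicate_succ]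
    exact foldConst t _ p

-- B's loop, characterised: starting from shift 8*(len-1) it XORs in xorShifted
lemma foldB : ∀ (l : List Int) (r k : Int), k = 8 * ((l.length : Int) - 1) →
    (l.foldl (fun (s : Int × Int) (b : Int) => (PySem.Int.bxor s.1 (b <<< s.2.toNat), s.2 - 8)) (r, k)).1
      = PySem.Int.bxor r (xorShifted l)
  | [], r, k, _ => by simp [xorShifted, PySem.Int.bxor_zero]
  | b :: t, r, k, hk => by
    simp only [List.foldl_cons, xorShifted]
    rw [foldB t _ (k - 8) (by simp at hk; omega)]
    have hkt : k.toNat = 8 * t.length := by simp at hk; omega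
    rw [hkt, bxor_assoc]

-- ===== VERDICT (by name: the statement is the Claim_ definition above) =====
theorem convert_byte_to_block_spec : Claim_equal_convert_byte_to_block := by
  intro byte _
  unfold Spec_convert_byte_to_block convert_byte_to_block convert_byte_to_block_alt
  simp only [foldPair, zero_add]
  rw [foldConst, PySem.List.length_pyRange_one, sub_zero, ← List.foldl_append, foldA,
    Int.zero_shiftLeft, foldB _ 0 _ rfl]
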